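-- pv_equiv track=rewrite | github.com/eventvendors/telegram-interpreter-bot | app/web.py | _split_phone_number
-- ===== SOURCE A (Python) =====
-- PHONE_COUNTRY_CODE_OPTIONS = [
--     ("+971", "UAE (+971)"),
--     ("+966", "Saudi Arabia (+966)"),
--     ("+965", "Kuwait (+965)"),
--     ("+973", "Bahrain (+973)"),
--     ("+974", "Qatar (+974)"),
--     ("+968", "Oman (+968)"),
--     ("+20", "Egypt (+20)"),
--     ("+44", "UK (+44)"),
--     ("+1", "USA/Canada (+1)"),
--     ("+33", "France (+33)"),
--     ("+49", "Germany (+49)"),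
--     ("+34", "Spain (+34)"),
--     ("+7", "Russia/Kazakhstan (+7)"),
--     ("+91", "India (+91)"),
--     ("+81", "Japan (+81)"),
--     ("+84", "Vietnam (+84)"),
-- ]
--
-- def _split_phone_number(phone_number: str) -> tuple[str, str]:
--     stripped = phone_number.strip()
--     if not stripped:
--         return PHONE_COUNTRY_CODE_OPTIONS[0][0], ""
--     for code, _label in PHONE_COUNTRY_CODE_OPTIONS:
--         if stripped == code:
--             return code, ""
--         if stripped.startswith(code + " "):
--             return code, stripped[len(code) + 1 :].strip()
--     return PHONE_COUNTRY_CODE_OPTIONS[0][0], stripped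
-- ===== SOURCE B (Python) =====
-- PHONE_COUNTRY_CODE_OPTIONS = [
--     ("+971", "UAE (+971)"),
--     ("+966", "Saudi Arabia (+966)"),
--     ("+965", "Kuwait (+965)"),
--     ("+973", "Bahrain (+973)"),
--     ("+974", "Qatar (+974)"),
--     ("+968", "Oman (+968)"),
--     ("+20", "Egypt (+20)"),
--     ("+44", "UK (+44)"),
--     ("+1", "USA/Canada (+1)"),
--     ("+33", "France (+33)"),
--     ("+49", "Germany (+49)"),
--     ("+34", "Spain (+34)"),
--     ("+7", "Russia/Kazakhstan (+7)"),
--     ("+91", "India (+91)"),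
--     ("+81", "Japan (+81)"),
--     ("+84", "Vietnam (+84)"),
-- ]
--
-- _CODES = {code for code, _label in PHONE_COUNTRY_CODE_OPTIONS}
--
-- def _split_phone_number(phone_number: str) -> tuple[str, str]:
--     stripped = phone_number.strip()
--     parts = stripped.split(" ", 1)
--     if parts[0] in _CODES:
--         return parts[0], parts[1].strip() if len(parts) > 1 else ""
--     return PHONE_COUNTRY_CODE_OPTIONS[0][0], stripped
-- ===== Notes on version B (the rewrite author's own statement) =====
-- stated objective: idiomatic
-- what changed: A scans every (code, label) candidate, testing exact equality and a code-plus-space prefix per candidate; B splits the stripped input once at the first space and does a single set-membership lookup of the first token.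
import Mathlib
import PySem

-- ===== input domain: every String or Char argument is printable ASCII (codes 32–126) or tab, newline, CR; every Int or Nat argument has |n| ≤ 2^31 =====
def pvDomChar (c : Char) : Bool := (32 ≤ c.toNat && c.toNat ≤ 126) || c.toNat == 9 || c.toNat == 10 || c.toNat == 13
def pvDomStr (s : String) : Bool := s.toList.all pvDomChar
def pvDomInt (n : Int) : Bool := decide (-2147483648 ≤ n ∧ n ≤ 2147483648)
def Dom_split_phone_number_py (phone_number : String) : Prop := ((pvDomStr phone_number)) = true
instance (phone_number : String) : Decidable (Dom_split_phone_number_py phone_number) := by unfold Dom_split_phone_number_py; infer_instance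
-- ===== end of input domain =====

-- B replaces A's scan over every candidate code by split-on-first-space plus one set lookup (idiomatic; same behaviour).

-- ===== PORT A =====
-- PHONE_COUNTRY_CODE_OPTIONS
def pvOptions : List (String × String) :=
  [("+971", "UAE (+971)"), ("+966", "Saudi Arabia (+966)"), ("+965", "Kuwait (+965)"),
   ("+973", "Bahrain (+973)"), ("+974", "Qatar (+974)"), ("+968", "Oman (+968)"),
   ("+20", "Egypt (+20)"), ("+44", "UK (+44)"), ("+1", "USA/Canada (+1)"),
   ("+33", "France (+33)"), ("+49", "Germany (+49)"), ("+34", "Spain (+34)"),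
   ("+7", "Russia/Kazakhstan (+7)"), ("+91", "India (+91)"), ("+81", "Japan (+81)"),
   ("+84", "Vietnam (+84)")]

-- PHONE_COUNTRY_CODE_OPTIONS[0][0]  (the list literal is non-empty, so headD never uses its default)
def pvDefaultCode : String := (pvOptions.headD ("", "")).1

-- the 'for code, _label in PHONE_COUNTRY_CODE_OPTIONS' loop of A, with its early returns
def pvLoopA (stripped : List Char) : List (String × String) → String × String
  | [] => (pvDefaultCode, String.ofList stripped)
  | (code, _label) :: rest =>
    if stripped = code.toList then (code, "")
    else if PySem.Chars.startswith stripped (code.toList ++ [' ']) then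
      -- stripped[len(code) + 1 :].strip()
      (code, String.ofList (PySem.Chars.strip
        (PySem.List.slice stripped (some ((code.toList.length : Int) + 1)) none)))
    else pvLoopA stripped rest

def split_phone_number_py (phone_number : String) : String × String :=
  let stripped := PySem.Chars.strip phone_number.toList
  if stripped = [] then (pvDefaultCode, "")
  else pvLoopA stripped pvOptions

-- ===== PORT B =====
-- _CODES = {code for code, _label in PHONE_COUNTRY_CODE_OPTIONS}
def pvCodes : PySem.Set String := PySem.Set.ofList (pvOptions.map Prod.fst)

def split_phone_number_py_alt (phone_number : String) : String × String :=
  let stripped := PySem.Chars.strip phone_number.toList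
  let parts := PySem.Chars.splitOnMax stripped [' '] 1   -- stripped.split(" ", 1)
  let pfx := parts.headD []                               -- parts[0] (split is never empty)
  if pvCodes.contains (String.ofList pfx) then
    (String.ofList pfx,
      if parts.length > 1 then String.ofList (PySem.Chars.strip (PySem.List.pyGetD parts 1 [])) else "")
  else (pvDefaultCode, String.ofList stripped)

-- ===== PRECONDITION & SPEC =====
def Spec_split_phone_number_py (phone_number : String) (out : String × String) : Prop := out = split_phone_number_py_alt phone_number
instance (phone_number : String) (out : String × String) : Decidable (Spec_split_phone_number_py phone_number out) := by unfold Spec_split_phone_number_py; infer_instance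

-- ===== CLAIM (what is proved, stated in full; the proofs are below) =====
def Claim_equal_split_phone_number_py : Prop := ∀ (phone_number : String), Dom_split_phone_number_py phone_number → Spec_split_phone_number_py phone_number (split_phone_number_py phone_number)

-- ===== LEMMAS AND PROOFS =====

-- splitOnMax.go with the split budget exhausted copies the rest of the input as one piece
lemma pv_go_mzero : ∀ (fuel : Nat) (l cur : List Char) (acc : List (List Char)),
    PySem.Chars.splitOnMax.go [' '] fuel 0 l cur acc = ((cur.reverse ++ l) :: acc).reverse
  | 0, l, cur, acc => by simp [PySem.Chars.splitOnMax.go]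
  | fuel + 1, [], cur, acc => by simp [PySem.Chars.splitOnMax.go]
  | fuel + 1, c :: rest, cur, acc => by simp [PySem.Chars.splitOnMax.go]

-- on space-free input the separator branch never fires
lemma pv_go_noSpace : ∀ (fuel : Nat) (l : List Char), ' ' ∉ l → l.length < fuel →
    ∀ (m : Nat) (cur : List Char) (acc : List (List Char)),
    PySem.Chars.splitOnMax.go [' '] fuel m l cur acc = ((cur.reverse ++ l) :: acc).reverse
  | 0, l, _, hf, m, cur, acc => by omega
  | fuel + 1, [], _, _, m, cur, acc => by simp [PySem.Chars.splitOnMax.go]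
  | fuel + 1, c :: rest, hl, hf, m, cur, acc => by
    have hc : c ≠ ' ' := fun h => hl (h ▸ List.mem_cons_self ..)
    rcases Nat.eq_zero_or_pos m with hm | hm
    · subst hm; exact pv_go_mzero _ _ _ _
    · have hrest : ' ' ∉ rest := fun h => hl (List.mem_cons_of_mem _ h)
      have := pv_go_noSpace fuel rest hrest (by simpa using Nat.lt_of_succ_lt_succ hf) m (c :: cur) acc
      simp only [PySem.Chars.splitOnMax.go]
      rw [if_neg (by omega)]
      rw [if_neg (by simp [List.isPrefixOf, hc.symm])]
      rw [this]
      simp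

-- one split: the first space-free block is cut off, the remainder is one piece
lemma pv_go_space : ∀ (a : List Char), ' ' ∉ a → ∀ (fuel : Nat), a.length < fuel →
    ∀ (b cur : List Char) (acc : List (List Char)),
    PySem.Chars.splitOnMax.go [' '] fuel 1 (a ++ ' ' :: b) cur acc
      = acc.reverse ++ [cur.reverse ++ a, b]
  | [], _, fuel + 1, _, b, cur, acc => by
    simp only [PySem.Chars.splitOnMax.go, List.nil_append]
    rw [if_neg (by omega), if_pos (by simp [List.isPrefixOf])]
    rw [pv_go_mzero]
    simp
  | c :: a', ha, fuel + 1, hf, b, cur, acc => by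
    have hc : c ≠ ' ' := fun h => ha (h ▸ List.mem_cons_self ..)
    have ha' : ' ' ∉ a' := fun h => ha (List.mem_cons_of_mem _ h)
    have := pv_go_space a' ha' fuel (by simpa using Nat.lt_of_succ_lt_succ hf) b (c :: cur) acc
    simp only [PySem.Chars.splitOnMax.go, List.cons_append]
    rw [if_neg (by omega), if_neg (by simp [List.isPrefixOf, hc.symm])]
    rw [this]
    simp

lemma pv_split_noSpace (s : List Char) (hs : ' ' ∉ s) :
    PySem.Chars.splitOnMax s [' '] 1 = [s] := by
  unfold PySem.Chars.splitOnMax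
  rw [if_neg (by omega)]
  rw [pv_go_noSpace (s.length + 1) s hs (by omega)]
  simp

lemma pv_split_space (a b : List Char) (ha : ' ' ∉ a) :
    PySem.Chars.splitOnMax (a ++ ' ' :: b) [' '] 1 = [a, b] := by
  unfold PySem.Chars.splitOnMax
  rw [if_neg (by omega)]
  simp only [Int.toNat_one]
  rw [pv_go_space a ha _ (by simp)]
  simp

-- decompose at the FIRST space
lemma pv_firstSpace : ∀ (s : List Char), ' ' ∈ s → ∃ a b, s = a ++ ' ' :: b ∧ ' ' ∉ a
  | c :: rest, h => by
    by_cases hc : c = ' '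
    · exact ⟨[], rest, by simp [hc], by simp⟩
    · have hr : ' ' ∈ rest := (List.mem_cons.mp h).resolve_left (fun h' => hc h'.symm)
      obtain ⟨a, b, hab, hna⟩ := pv_firstSpace rest hr
      refine ⟨c :: a, b, by simp [hab], ?_⟩
      intro hm
      rcases List.mem_cons.mp hm with h' | h'
      · exact hc h'.symm
      · exact hna h'

lemma pv_prefix_space : ∀ (c a b : List Char), ' ' ∉ a → ' ' ∉ c →
    ((c ++ [' ']) <+: (a ++ ' ' :: b)) → c = a
  | [], [], _, _, _, _ => rfl
  | [], x :: a', b, ha, _, h => by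
    obtain ⟨t, ht⟩ := h
    simp at ht
    exact absurd ht.1.symm (fun hx => ha (hx ▸ List.mem_cons_self ..))
  | x :: c', [], b, _, hc, h => by
    obtain ⟨t, ht⟩ := h
    simp at ht
    exact absurd ht.1 (fun hx => hc (hx ▸ List.mem_cons_self ..))
  | x :: c', y :: a', b, ha, hc, h => by
    obtain ⟨t, ht⟩ := h
    simp at ht
    obtain ⟨hxy, ht'⟩ := ht
    have := pv_prefix_space c' a' b (fun h => ha (List.mem_cons_of_mem _ h))
      (fun h => hc (List.mem_cons_of_mem _ h)) ⟨t, by simpa using ht'⟩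
    simp [hxy, this]

lemma pv_prefix_space_iff (a b c : List Char) (ha : ' ' ∉ a) (hc : ' ' ∉ c) :
    (c ++ [' ']) <+: (a ++ ' ' :: b) ↔ c = a := by
  constructor
  · exact pv_prefix_space c a b ha hc
  · rintro rfl
    exact ⟨b, by simp⟩

lemma pv_ofList_eq_iff (s : List Char) (t : String) : String.ofList s = t ↔ s = t.toList := by
  constructor
  · rintro rfl; simp
  · intro h
    rw [h, String.ofList_toList]

-- A's loop on space-free stripped input: only the exact-equality branch can fire
lemma pv_loopA_noSpace (s : List Char) (hs : ' ' ∉ s) :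
    ∀ (opts : List (String × String)), (∀ p ∈ opts, ' ' ∉ p.1.toList) →
    pvLoopA s opts =
      if String.ofList s ∈ opts.map Prod.fst then (String.ofList s, "") else (pvDefaultCode, String.ofList s)
  | [], _ => by simp [pvLoopA]
  | (code, label) :: rest, hopts => by
    have hcode : ' ' ∉ code.toList := hopts _ (List.mem_cons_self ..)
    have hrest : ∀ p ∈ rest, ' ' ∉ p.1.toList := fun p hp => hopts p (List.mem_cons_of_mem _ hp)
    by_cases he : s = code.toList
    · have hmk : String.ofList s = code := (pv_ofList_eq_iff _ _).mpr he
      rw [pvLoopA, if_pos he]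
      rw [if_pos (by simp [List.mem_cons]; left; exact hmk)]
      rw [hmk]
    · have hmk : ¬ String.ofList s = code := fun h => he ((pv_ofList_eq_iff _ _).mp h)
      have hsw : PySem.Chars.startswith s (code.toList ++ [' ']) = false := by
        rw [Bool.eq_false_iff]
        intro h
        rw [PySem.Chars.startswith_iff] at h
        exact hs (h.subset (by simp))
      rw [pvLoopA, if_neg he, hsw]
      simp only [Bool.false_eq_true, if_false]
      rw [pv_loopA_noSpace s hs rest hrest]
      have hiff : String.ofList s ∈ (((code, label) :: rest).map Prod.fst) ↔ String.ofList s ∈ rest.map Prod.fst := by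
        simp [List.mem_cons, hmk]
      simp only [List.map_cons] at hiff ⊢
      simp only [hiff]

-- A's loop when stripped = a ++ ' ' :: b with a space-free: only the startswith branch can fire
lemma pv_loopA_space (a b : List Char) (ha : ' ' ∉ a) :
    ∀ (opts : List (String × String)), (∀ p ∈ opts, ' ' ∉ p.1.toList) →
    pvLoopA (a ++ ' ' :: b) opts =
      if String.ofList a ∈ opts.map Prod.fst then (String.ofList a, String.ofList (PySem.Chars.strip b))
      else (pvDefaultCode, String.ofList (a ++ ' ' :: b))
  | [], _ => by simp [pvLoopA]
  | (code, label) :: rest, hopts => by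
    have hcode : ' ' ∉ code.toList := hopts _ (List.mem_cons_self ..)
    have hrest : ∀ p ∈ rest, ' ' ∉ p.1.toList := fun p hp => hopts p (List.mem_cons_of_mem _ hp)
    have hne : a ++ ' ' :: b ≠ code.toList := by
      intro h
      exact hcode (h ▸ (by simp : ' ' ∈ a ++ ' ' :: b))
    by_cases he : code.toList = a
    · have hmk : String.ofList a = code := (pv_ofList_eq_iff _ _).mpr he.symm
      rw [pvLoopA, if_neg hne]
      rw [if_pos (by rw [PySem.Chars.startswith_iff, pv_prefix_space_iff a b _ ha hcode]; exact he)]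
      rw [if_pos (by simp [List.mem_cons]; left; exact hmk)]
      rw [PySem.List.slice_from _ (by positivity)]
      have hdrop : (((code.toList.length : Int) + 1)).toNat = a.length + 1 := by
        rw [he]; omega
      rw [hdrop]
      have hd : (a ++ ' ' :: b).drop (a.length + 1) = b := by
        have h1 : a ++ ' ' :: b = (a ++ [' ']) ++ b := by simp
        rw [h1, List.drop_append_of_le_length (by simp)]
        simp
      rw [hd, hmk]
    · have hmk : ¬ String.ofList a = code := fun h => he ((pv_ofList_eq_iff _ _).mp h).symm
      have hsw : PySem.Chars.startswith (a ++ ' ' :: b) (code.toList ++ [' ']) = false := by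
        rw [Bool.eq_false_iff]
        intro h
        rw [PySem.Chars.startswith_iff, pv_prefix_space_iff a b _ ha hcode] at h
        exact he h
      rw [pvLoopA, if_neg hne, hsw]
      simp only [Bool.false_eq_true, if_false]
      rw [pv_loopA_space a b ha rest hrest]
      have hiff : String.ofList a ∈ (((code, label) :: rest).map Prod.fst) ↔ String.ofList a ∈ rest.map Prod.fst := by
        simp [List.mem_cons, hmk]
      simp only [List.map_cons] at hiff ⊢
      simp only [hiff]

lemma pv_codes_noSpace : ∀ p ∈ pvOptions, ' ' ∉ p.1.toList := by decide

lemma pv_codes_nonempty : ∀ p ∈ pvOptions, p.1.toList ≠ [] := by decide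

lemma pv_contains_iff (x : String) :
    pvCodes.contains x = true ↔ x ∈ pvOptions.map Prod.fst := by
  unfold pvCodes
  rw [PySem.Set.contains_iff, PySem.Set.mem_ofList]

-- ===== VERDICT (by name: the statement is the Claim_ definition above) =====
theorem split_phone_number_py_spec : Claim_equal_split_phone_number_py := by
  intro phone_number _
  unfold Spec_split_phone_number_py split_phone_number_py split_phone_number_py_alt
  dsimp only
  set s := PySem.Chars.strip phone_number.toList with hsdef
  by_cases hmem : ' ' ∈ s
  · obtain ⟨a, b, hab, hna⟩ := pv_firstSpace s hmem
    have hsne : s ≠ [] := by rw [hab]; simp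
    rw [if_neg hsne, hab, pv_loopA_space a b hna pvOptions pv_codes_noSpace,
        pv_split_space a b hna]
    simp only [List.headD_cons, List.length_cons]
    by_cases hc : String.ofList a ∈ pvOptions.map Prod.fst
    · rw [if_pos hc, if_pos (by rw [pv_contains_iff]; exact hc)]
      norm_num
      simp [PySem.List.pyGetD]
    · rw [if_neg hc, if_neg (fun h => hc ((pv_contains_iff _).mp h))]
  · rw [pv_split_noSpace s hmem]
    simp only [List.headD_cons, List.length_singleton]
    by_cases hc : String.ofList s ∈ pvOptions.map Prod.fst
    · have hsne : s ≠ [] := by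
        intro h
        obtain ⟨p, hp, hps⟩ := List.mem_map.mp hc
        have hsp : s = p.1.toList := (pv_ofList_eq_iff _ _).mp hps.symm
        exact pv_codes_nonempty p hp (by rw [← hsp, h])
      rw [if_neg hsne, pv_loopA_noSpace s hmem pvOptions pv_codes_noSpace, if_pos hc,
          if_pos (by rw [pv_contains_iff]; exact hc)]
      norm_num
    · rw [if_neg (fun h => hc ((pv_contains_iff _).mp h))]
      by_cases hsnil : s = []
      · rw [if_pos hsnil, hsnil]
      · rw [if_neg hsnil, pv_loopA_noSpace s hmem pvOptions pv_codes_noSpace, if_neg hc]
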